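-- pv_equiv track=rewrite | github.com/Maheshvala318/KisaanAI-2.0 | scripts/archive/test_one_row.py | heading_to_field
-- ===== SOURCE A (Python) =====
-- def heading_to_field(heading: str) -> str:
--     h = heading.lower().strip()
--     if any(x in h for x in ["detail", "about", "overview", "description"]):
--         return "scheme_details"
--     if any(x in h for x in ["benefit", "financial", "what you get"]):
--         return "benefits"
--     if any(x in h for x in ["eligib", "who can"]):
--         return "eligibility"
--     if any(x in h for x in ["application", "how to", "apply", "steps"]):
--         return "application_process"
--     if any(x in h for x in ["document", "required doc"]):
--         return "documents_required"
--     return ""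
-- ===== SOURCE B (Python) =====
-- _KEYWORD_FIELD = {
--     "detail": "scheme_details",
--     "about": "scheme_details",
--     "overview": "scheme_details",
--     "description": "scheme_details",
--     "benefit": "benefits",
--     "financial": "benefits",
--     "what you get": "benefits",
--     "eligib": "eligibility",
--     "who can": "eligibility",
--     "application": "application_process",
--     "how to": "application_process",
--     "apply": "application_process",
--     "steps": "application_process",
--     "document": "documents_required",
--     "required doc": "documents_required",
-- }
-- _FIELDS = ["scheme_details", "benefits", "eligibility",
--            "application_process", "documents_required"]
--
-- def heading_to_field(heading: str) -> str:
--     h = heading.lower().strip()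
--     best = len(_FIELDS)
--     for kw, field in _KEYWORD_FIELD.items():
--         if kw in h:
--             best = min(best, _FIELDS.index(field))
--     return _FIELDS[best] if best < len(_FIELDS) else ""
-- ===== Notes on version B (the rewrite author's own statement) =====
-- stated objective: alternative
-- what changed: Replaces the ordered if-chain of group scans with a flat keyword->field map scanned exhaustively while keeping a running minimum precedence rank; the answer is the field of minimal rank among all matched keywords (argmin recovers first-match precedence).
import Mathlib
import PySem

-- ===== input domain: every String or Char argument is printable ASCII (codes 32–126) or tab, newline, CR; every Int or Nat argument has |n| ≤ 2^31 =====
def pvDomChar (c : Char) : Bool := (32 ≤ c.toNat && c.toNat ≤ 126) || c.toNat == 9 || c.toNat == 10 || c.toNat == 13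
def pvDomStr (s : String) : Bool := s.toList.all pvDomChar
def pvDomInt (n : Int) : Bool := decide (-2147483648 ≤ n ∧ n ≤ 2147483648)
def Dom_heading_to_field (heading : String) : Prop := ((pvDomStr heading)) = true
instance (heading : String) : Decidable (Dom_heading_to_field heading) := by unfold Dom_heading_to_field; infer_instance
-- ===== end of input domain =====

-- B replaces the ordered if-chain by an exhaustive scan of a flat keyword->field map with a running minimum precedence rank (alternative algorithm; argmin of rank recovers first-match precedence).


-- ===== PORT A =====
def heading_to_field (heading : String) : String :=
  let h := PySem.Str.strip (PySem.Str.lower heading)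
  if ["detail", "about", "overview", "description"].any (fun x => PySem.Str.isIn x h) then
    "scheme_details"
  else if ["benefit", "financial", "what you get"].any (fun x => PySem.Str.isIn x h) then
    "benefits"
  else if ["eligib", "who can"].any (fun x => PySem.Str.isIn x h) then
    "eligibility"
  else if ["application", "how to", "apply", "steps"].any (fun x => PySem.Str.isIn x h) then
    "application_process"
  else if ["document", "required doc"].any (fun x => PySem.Str.isIn x h) then
    "documents_required"
  else ""

-- ===== PORT B =====
-- _KEYWORD_FIELD: constant dict, port as association list in insertion order
def htfKw : List (String × String) :=
  [ ("detail", "scheme_details"), ("about", "scheme_details")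
  , ("overview", "scheme_details"), ("description", "scheme_details")
  , ("benefit", "benefits"), ("financial", "benefits"), ("what you get", "benefits")
  , ("eligib", "eligibility"), ("who can", "eligibility")
  , ("application", "application_process"), ("how to", "application_process")
  , ("apply", "application_process"), ("steps", "application_process")
  , ("document", "documents_required"), ("required doc", "documents_required") ]

def htfFields : List String :=
  ["scheme_details", "benefits", "eligibility", "application_process", "documents_required"]

-- _FIELDS.index(field) never raises here (every dict value is in _FIELDS), so the
-- .getD 0 default of index? is never taken; likewise best < len guards _FIELDS[best],
-- so pyGet?'s default "" is never taken: the port is exact.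
def heading_to_field_alt (heading : String) : String :=
  let h := PySem.Str.strip (PySem.Str.lower heading)
  let best := htfKw.foldl
    (fun best kf =>
      if PySem.Str.isIn kf.1 h then
        min best (((PySem.List.index? htfFields kf.2).getD 0 : Nat) : Int)
      else best)
    ((htfFields.length : Int))
  if best < (htfFields.length : Int) then (PySem.List.pyGet? htfFields best).getD "" else ""

-- ===== PRECONDITION & SPEC =====
def Spec_heading_to_field (heading : String) (out : String) : Prop := out = heading_to_field_alt heading
instance (heading : String) (out : String) : Decidable (Spec_heading_to_field heading out) := by unfold Spec_heading_to_field; infer_instance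

-- ===== CLAIM (what is proved, stated in full; the proofs are below) =====
def Claim_equal_heading_to_field : Prop := ∀ (heading : String), Dom_heading_to_field heading → Spec_heading_to_field heading (heading_to_field heading)

-- ===== LEMMAS AND PROOFS =====

-- one group of keywords sharing rank p: the min-fold over them acts like one conditional min
theorem htf_fold_group (q : String → Bool) (ks : List String) (p a : Int) :
    ks.foldl (fun b k => if q k then min b p else b) a
      = if ks.any q then min a p else a := by
  induction ks generalizing a with
  | nil => simp
  | cons k t ih =>
    simp only [List.foldl_cons, List.any_cons]
    by_cases hq : q k = true
    · rw [if_pos hq, ih]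
      simp only [hq, Bool.true_or]
      split_ifs <;> omega
    · simp only [Bool.not_eq_true] at hq
      rw [if_neg (by simp [hq]), ih]
      simp only [hq, Bool.false_or]

-- ===== VERDICT (by name: the statement is the Claim_ definition above) =====
theorem heading_to_field_spec : Claim_equal_heading_to_field := by
  intro heading _
  unfold Spec_heading_to_field heading_to_field heading_to_field_alt
  set h := PySem.Str.strip (PySem.Str.lower heading) with hh
  have hsplit : htfKw =
      (["detail", "about", "overview", "description"].map (fun k => (k, "scheme_details")))
      ++ (["benefit", "financial", "what you get"].map (fun k => (k, "benefits")))
      ++ (["eligib", "who can"].map (fun k => (k, "eligibility")))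
      ++ (["application", "how to", "apply", "steps"].map (fun k => (k, "application_process")))
      ++ (["document", "required doc"].map (fun k => (k, "documents_required"))) := by rfl
  rw [hsplit]
  simp only [List.foldl_append, List.foldl_map]
  rw [htf_fold_group, htf_fold_group, htf_fold_group, htf_fold_group, htf_fold_group]
  by_cases h1 : ["detail", "about", "overview", "description"].any (fun x => PySem.Str.isIn x h) <;>
  by_cases h2 : ["benefit", "financial", "what you get"].any (fun x => PySem.Str.isIn x h) <;>
  by_cases h3 : ["eligib", "who can"].any (fun x => PySem.Str.isIn x h) <;>
  by_cases h4 : ["application", "how to", "apply", "steps"].any (fun x => PySem.Str.isIn x h) <;>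
  by_cases h5 : ["document", "required doc"].any (fun x => PySem.Str.isIn x h) <;>
  simp only [h1, h2, h3, h4, h5, if_true] <;> decide
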